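-- pv_equiv track=rewrite | github.com/zhaozihangbehappy-gif/Polaris | eval/runners/_common.py | count_redundant_tool_calls
-- ===== SOURCE A (Python) =====
-- def count_redundant_tool_calls(tool_calls: list[tuple[str, str]]) -> int:
--     """Identical (tool_name, stringified_args) seen before."""
--     seen: set[tuple[str, str]] = set()
--     redundant = 0
--     for sig in tool_calls:
--         if sig in seen:
--             redundant += 1
--         else:
--             seen.add(sig)
--     return redundant
-- ===== SOURCE B (Python) =====
-- def count_redundant_tool_calls(tool_calls: list[tuple[str, str]]) -> int:
--     """Identical (tool_name, stringified_args) seen before."""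
--     s = sorted(tool_calls)
--     return sum(1 for a, b in zip(s, s[1:]) if a == b)
-- ===== Notes on version B (the rewrite author's own statement) =====
-- stated objective: alternative
-- what changed: B is sort-then-scan: it sorts the signatures so equal ones become adjacent and counts adjacent equal pairs, with no seen-set, no membership test and no branch-with-counter loop.
import Mathlib
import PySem

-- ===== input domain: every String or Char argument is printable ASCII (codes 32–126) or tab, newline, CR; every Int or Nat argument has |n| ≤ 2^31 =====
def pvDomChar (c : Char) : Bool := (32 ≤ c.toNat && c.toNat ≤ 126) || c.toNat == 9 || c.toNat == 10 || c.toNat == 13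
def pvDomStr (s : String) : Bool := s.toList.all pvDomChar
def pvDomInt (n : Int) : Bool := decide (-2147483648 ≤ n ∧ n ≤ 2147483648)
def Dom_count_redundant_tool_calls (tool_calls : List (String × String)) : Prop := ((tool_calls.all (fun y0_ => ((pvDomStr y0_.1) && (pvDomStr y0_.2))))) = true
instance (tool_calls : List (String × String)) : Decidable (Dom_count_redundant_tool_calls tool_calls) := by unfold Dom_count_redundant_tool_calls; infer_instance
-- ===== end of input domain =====

-- B replaces A's single-pass seen-set loop by sort-then-scan: sort the signatures (equal ones become adjacent) and count adjacent equal pairs; objective: alternative.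
-- ===== PORT A =====
def count_redundant_tool_calls (tool_calls : List (String × String)) : Int :=
  (tool_calls.foldl
    (fun (st : PySem.Set (String × String) × Int) sig =>
      if PySem.Set.contains st.1 sig then (st.1, st.2 + 1)
      else (PySem.Set.add st.1 sig, st.2))
    (PySem.Set.empty, 0)).2

-- ===== PORT B =====
-- sorted(tool_calls): Python orders tuples lexicographically; the key 'toLex' is exactly that
-- comparison on String × String (exact: same comparator, same stable sort). s[1:] is 'List.drop 1 s'
-- (PySem.List.slice_from); the generator sum is the fold over 'zip'.
def count_redundant_tool_calls_alt (tool_calls : List (String × String)) : Int :=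
  let s := PySem.List.sorted tool_calls (fun p => (toLex p : Lex (String × String)))
  (s.zip (s.drop 1)).foldl (fun acc p => acc + (if p.1 = p.2 then 1 else 0)) 0

-- ===== PRECONDITION & SPEC =====
def Spec_count_redundant_tool_calls (tool_calls : List (String × String)) (out : Int) : Prop := out = count_redundant_tool_calls_alt tool_calls
instance (tool_calls : List (String × String)) (out : Int) : Decidable (Spec_count_redundant_tool_calls tool_calls out) := by unfold Spec_count_redundant_tool_calls; infer_instance

-- ===== CLAIM (what is proved, stated in full; the proofs are below) =====
def Claim_equal_count_redundant_tool_calls : Prop := ∀ (tool_calls : List (String × String)), Dom_count_redundant_tool_calls tool_calls → Spec_count_redundant_tool_calls tool_calls (count_redundant_tool_calls tool_calls)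

-- ===== LEMMAS AND PROOFS =====

-- A's loop invariant: counter = elements consumed minus growth of the seen set
theorem crtc_invariant (xs : List (String × String)) (seen : PySem.Set (String × String)) (red : Int) :
    (xs.foldl
      (fun (st : PySem.Set (String × String) × Int) sig =>
        if PySem.Set.contains st.1 sig then (st.1, st.2 + 1)
        else (PySem.Set.add st.1 sig, st.2))
      (seen, red)).2
    = red + (xs.length : Int) - (((PySem.Set.update seen xs).length : Int) - (seen.length : Int)) := by
  induction xs generalizing seen red with
  | nil => simp [PySem.Set.update]
  | cons x xs ih =>
    simp only [List.foldl_cons]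
    by_cases h : PySem.Set.contains seen x
    · have hmem : x ∈ seen := by simpa using h
      have hadd : PySem.Set.add seen x = seen := PySem.Set.add_of_mem hmem
      simp only [h, if_true]
      rw [ih, show PySem.Set.update seen (x :: xs) = PySem.Set.update seen xs by
        simp [PySem.Set.update, hadd]]
      push_cast [List.length_cons]
      ring
    · have hmem : x ∉ seen := by simpa using h
      have hadd : PySem.Set.add seen x = seen ++ [x] := PySem.Set.add_of_not_mem hmem
      simp only [h]
      rw [ih, hadd, show PySem.Set.update seen (x :: xs) = PySem.Set.update (seen ++ [x]) xs by
        simp [PySem.Set.update, hadd]]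
      push_cast [List.length_cons, List.length_append]
      simp only [List.length_nil, Nat.cast_zero]
      ring

theorem crtc_closed (xs : List (String × String)) :
    count_redundant_tool_calls xs = (xs.length : Int) - ((PySem.Set.ofList xs).length : Int) := by
  unfold count_redundant_tool_calls
  rw [crtc_invariant]
  rw [show PySem.Set.update (PySem.Set.empty : PySem.Set (String × String)) xs
      = PySem.Set.ofList xs from rfl]
  simp [PySem.Set.empty]

-- number of distinct elements: cons, duplicate head
theorem ofList_len_of_mem {α : Type} [BEq α] [LawfulBEq α] {x : α} {l : List α} (h : x ∈ l) :
    (PySem.Set.ofList (x :: l)).length = (PySem.Set.ofList l).length := by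
  apply List.Perm.length_eq
  rw [List.perm_ext_iff_of_nodup (PySem.Set.nodup_ofList _) (PySem.Set.nodup_ofList _)]
  intro a
  simp only [PySem.Set.mem_ofList, List.mem_cons]
  constructor
  · rintro (rfl | ha) <;> [exact h; exact ha]
  · exact Or.inr

-- number of distinct elements: cons, fresh head
theorem ofList_len_of_not_mem {α : Type} [BEq α] [LawfulBEq α] {x : α} {l : List α} (h : x ∉ l) :
    (PySem.Set.ofList (x :: l)).length = (PySem.Set.ofList l).length + 1 := by
  have hperm : (PySem.Set.ofList (x :: l)).Perm (x :: PySem.Set.ofList l) := by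
    rw [List.perm_ext_iff_of_nodup (PySem.Set.nodup_ofList _)
      (List.nodup_cons.mpr ⟨by simpa [PySem.Set.mem_ofList] using h, PySem.Set.nodup_ofList _⟩)]
    intro a
    simp [PySem.Set.mem_ofList]
  simpa using hperm.length_eq

-- the adjacent-equal count, structurally
def adjEq : List (String × String) → Int
  | [] => 0
  | [_] => 0
  | x :: y :: t => (if x = y then 1 else 0) + adjEq (y :: t)

theorem zipfold_eq_adjEq (l : List (String × String)) (acc : Int) :
    (l.zip (l.drop 1)).foldl (fun acc p => acc + (if p.1 = p.2 then 1 else 0)) acc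
      = acc + adjEq l := by
  induction l generalizing acc with
  | nil => simp [adjEq]
  | cons x l ih =>
    cases l with
    | nil => simp [adjEq]
    | cons y t =>
      simp only [List.drop_succ_cons, List.drop_zero, List.zip_cons_cons, List.foldl_cons] at ih ⊢
      rw [ih]
      simp only [adjEq]
      ring

-- on a list ordered by an injective monotone key, adjacent-equal pairs count duplicates exactly
theorem adjEq_grouped (l : List (String × String))
    (h : l.Pairwise (fun a b => (toLex a : Lex (String × String)) ≤ toLex b)) :
    adjEq l = (l.length : Int) - ((PySem.Set.ofList l).length : Int) := by
  induction l with
  | nil => simp [adjEq]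
  | cons x l ih =>
    cases l with
    | nil => simp [adjEq, PySem.Set.ofList, PySem.Set.add, PySem.Set.empty, PySem.Set.contains]
    | cons y t =>
      have hx : ∀ z ∈ y :: t, (toLex x : Lex (String × String)) ≤ toLex z :=
        fun z hz => (List.pairwise_cons.mp h).1 z hz
      have htail : (y :: t).Pairwise (fun a b => (toLex a : Lex (String × String)) ≤ toLex b) :=
        (List.pairwise_cons.mp h).2
      by_cases hxy : x = y
      · have hmem : x ∈ y :: t := by simp [hxy]
        rw [show adjEq (x :: y :: t) = 1 + adjEq (y :: t) by simp [adjEq, hxy],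
          ofList_len_of_mem hmem, ih htail]
        push_cast [List.length_cons]; ring
      · have hmem : x ∉ y :: t := by
          intro hmemc
          rcases List.mem_cons.mp hmemc with h' | hmemt
          · exact hxy h'
          · have h1 : (toLex x : Lex (String × String)) ≤ toLex y := hx y (by simp)
            have h2 : (toLex y : Lex (String × String)) ≤ toLex x :=
              (List.pairwise_cons.mp htail).1 x hmemt
            exact hxy (toLex.injective (le_antisymm h1 h2))
        rw [show adjEq (x :: y :: t) = adjEq (y :: t) by simp [adjEq, hxy],
          ofList_len_of_not_mem hmem, ih htail]
        push_cast [List.length_cons]; ring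

-- ===== VERDICT (by name: the statement is the Claim_ definition above) =====
theorem count_redundant_tool_calls_spec : Claim_equal_count_redundant_tool_calls := by
  intro xs _
  unfold Spec_count_redundant_tool_calls count_redundant_tool_calls_alt
  rw [zipfold_eq_adjEq, adjEq_grouped _ (PySem.List.sorted_pairwise xs _), crtc_closed]
  have hperm := PySem.List.sorted_perm xs (fun p => (toLex p : Lex (String × String))) false
  have hlen : (PySem.Set.ofList (PySem.List.sorted xs (fun p => (toLex p : Lex (String × String))) false)).length
      = (PySem.Set.ofList xs).length := by
    apply List.Perm.length_eq
    rw [List.perm_ext_iff_of_nodup (PySem.Set.nodup_ofList _) (PySem.Set.nodup_ofList _)]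
    intro a
    simp [PySem.Set.mem_ofList, hperm.mem_iff]
  rw [hlen, hperm.length_eq]
  ring
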